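-- pv_equiv track=rewrite | github.com/shartgers/book | .cursor/skills/publish-kdp-ingramspark/scripts/build_print_pdf.py | wrap_definition_blocks
-- ===== SOURCE A (Python) =====
-- def wrap_definition_blocks(html: str) -> str:
--     """
--     Wrap blockquotes that contain 'Definition:' in a div.definition-block
--     so they can be styled with a box and background.
--     """
--     # Find <blockquote>...</blockquote> that contains Definition:
--     result = []
--     pos = 0
--     while True:
--         start = html.find("<blockquote>", pos)
--         if start == -1:
--             result.append(html[pos:])
--             break
--         end = html.find("</blockquote>", start)
--         if end == -1:
--             result.append(html[pos:])
--             break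
--         end += len("</blockquote>")
--         block = html[start:end]
--         if "Definition:" in block or "**Definition:" in block:
--             result.append(html[pos:start])
--             result.append('<div class="definition-block">')
--             result.append(block)
--             result.append("</div>")
--         else:
--             result.append(html[pos:end])
--         pos = end
--     return "".join(result)
-- ===== SOURCE B (Python) =====
-- def wrap_definition_blocks(html: str) -> str:
--     """
--     Wrap blockquotes that contain 'Definition:' in a div.definition-block.
--     Split on the closing tag: each piece before the last, re-suffixed with
--     '</blockquote>', holds exactly one closing tag; the block (if any) runs
--     from the first '<blockquote>' in that piece to its end.
--     """
--     parts = html.split("</blockquote>")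
--     out = []
--     for seg in parts[:-1]:
--         chunk = seg + "</blockquote>"
--         i = chunk.find("<blockquote>")
--         if i != -1 and "Definition:" in chunk[i:]:
--             out.append(chunk[:i] + '<div class="definition-block">' + chunk[i:] + "</div>")
--         else:
--             out.append(chunk)
--     out.append(parts[-1])
--     return "".join(out)
-- ===== Notes on version B (the rewrite author's own statement) =====
-- stated objective: idiomatic
-- what changed: B replaces A's manual while-loop scanning with find(open-tag)/find(close-tag)/position bookkeeping by a split on '</blockquote>': each piece before the last, re-suffixed with the closing tag, contains exactly one closing tag, and the block (if any) runs from the piece's first '<blockquote>' to its end; B also drops A's redundant '**Definition:' test.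
import Mathlib
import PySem

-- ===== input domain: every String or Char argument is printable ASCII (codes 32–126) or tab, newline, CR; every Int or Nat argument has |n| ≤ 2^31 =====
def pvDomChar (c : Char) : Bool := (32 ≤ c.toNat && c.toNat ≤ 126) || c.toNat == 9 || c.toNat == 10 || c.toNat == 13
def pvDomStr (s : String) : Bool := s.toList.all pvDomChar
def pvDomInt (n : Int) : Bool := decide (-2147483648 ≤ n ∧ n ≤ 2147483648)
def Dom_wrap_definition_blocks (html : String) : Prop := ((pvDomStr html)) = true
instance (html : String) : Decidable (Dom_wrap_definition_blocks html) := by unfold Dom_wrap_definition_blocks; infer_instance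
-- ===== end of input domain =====

-- B rewrites A's manual find-open/find-close cursor loop as a split on '</blockquote>' with
-- per-piece processing (idiomatic decomposition; same asymptotic cost). Equivalence is proved
-- for all inputs; no precondition (both programs are total).

-- shared string constants
def pvOpen : List Char := "<blockquote>".toList
def pvClose : List Char := "</blockquote>".toList
def pvDefn : List Char := "Definition:".toList
def pvDefn2 : List Char := "**Definition:".toList
def pvDivOpen : List Char := "<div class=\"definition-block\">".toList
def pvDivClose : List Char := "</div>".toList

-- ===== PORT A =====
-- the while-loop of A, as recursion on the remaining suffix html[pos:]
-- (start/end found exactly as A finds them: find(open), then find(close, start))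
def pvWrapGo (s : List Char) : List Char :=
  let start := PySem.Chars.find s pvOpen
  if h1 : start = -1 then s
  else
    let e := PySem.Chars.findFrom s pvClose start
    if h2 : e = -1 then s
    else
      let endi := e + 13
      let block := PySem.List.slice s (some start) (some endi)
      (if PySem.Chars.isIn pvDefn block || PySem.Chars.isIn pvDefn2 block then
        PySem.List.slice s none (some start) ++ pvDivOpen ++ block ++ pvDivClose
      else
        PySem.List.slice s none (some endi)) ++ pvWrapGo (PySem.List.slice s (some endi) none)
  termination_by s.length
  decreasing_by
    have h0 : -1 ≤ PySem.Chars.find s pvOpen := PySem.Chars.neg_one_le_find s pvOpen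
    have hle : PySem.Chars.find s pvOpen ≤ (s.length : Int) := PySem.Chars.find_le_length s pvOpen
    have hs : pvOpen <:+: s := (PySem.Chars.find_ne_neg_one_iff s pvOpen).mp h1
    have hlen : 12 ≤ s.length := hs.length_le
    have hk : (PySem.Chars.find s pvOpen).toNat ≤ s.length := by omega
    have hcast : ((PySem.Chars.find s pvOpen).toNat : Int) = PySem.Chars.find s pvOpen := by omega
    have h2' : ¬ PySem.Chars.findFrom s pvClose (PySem.Chars.find s pvOpen) = -1 := h2
    have he := PySem.Chars.findFrom_natCast s pvClose (PySem.Chars.find s pvOpen).toNat hk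
    rw [hcast] at he
    have hf : -1 ≤ PySem.Chars.find (s.drop (PySem.Chars.find s pvOpen).toNat) pvClose :=
      PySem.Chars.neg_one_le_find _ _
    have he2 : 0 ≤ PySem.Chars.findFrom s pvClose (PySem.Chars.find s pvOpen) := by
      rw [he]; split
      · next hcase => exact absurd (he.trans (if_pos hcase)) h2'
      · have h1' : ¬ PySem.Chars.find s pvOpen = -1 := h1
        omega
    show (PySem.List.slice s (some (PySem.Chars.findFrom s pvClose (PySem.Chars.find s pvOpen) + 13)) none).length < s.length
    rw [PySem.List.slice_from _ (by omega : (0:Int) ≤ PySem.Chars.findFrom s pvClose (PySem.Chars.find s pvOpen) + 13)]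
    simp only [List.length_drop]
    omega

def wrap_definition_blocks (html : String) : String :=
  String.ofList (pvWrapGo html.toList)

-- ===== PORT B =====
-- one piece of Source B's loop body: chunk = seg + "</blockquote>"
def pvChunk (chunk : List Char) : List Char :=
  let i := PySem.Chars.find chunk pvOpen
  if i = -1 then chunk
  else if PySem.Chars.isIn pvDefn (PySem.List.slice chunk (some i) none) then
    PySem.List.slice chunk none (some i) ++ pvDivOpen ++
      PySem.List.slice chunk (some i) none ++ pvDivClose
  else chunk

-- Source B on char lists: split on the closing tag, map the loop body over parts[:-1], append parts[-1]
def pvWrapB (s : List Char) : List Char :=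
  (((PySem.Chars.splitOn s pvClose).dropLast.map (fun seg => pvChunk (seg ++ pvClose))).flatten)
    ++ (PySem.Chars.splitOn s pvClose).getLastD []

def wrap_definition_blocks_alt (html : String) : String :=
  String.ofList (pvWrapB html.toList)

-- ===== PRECONDITION & SPEC =====
def Spec_wrap_definition_blocks (html : String) (out : String) : Prop := out = wrap_definition_blocks_alt html
instance (html : String) (out : String) : Decidable (Spec_wrap_definition_blocks html out) := by unfold Spec_wrap_definition_blocks; infer_instance

-- ===== CLAIM (what is proved, stated in full; the proofs are below) =====
def Claim_equal_wrap_definition_blocks : Prop := ∀ (html : String), Dom_wrap_definition_blocks html → Spec_wrap_definition_blocks html (wrap_definition_blocks html)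

-- ===== LEMMAS AND PROOFS =====

-- find = -1 iff no occurrence anywhere
theorem pv_find_neg_iff (s sub : List Char) :
    PySem.Chars.find s sub = -1 ↔ ∀ p, ¬ sub <+: s.drop p := by
  rw [PySem.Chars.find_eq_neg_one_iff]
  constructor
  · intro h p hp
    exact h ((PySem.Chars.isIn_iff_infix sub s).mp
      ((PySem.Chars.exists_prefix_drop_iff_isIn sub s).mp ⟨p, hp⟩))
  · intro h hinf
    obtain ⟨j, hj⟩ := (PySem.Chars.exists_prefix_drop_iff_isIn sub s).mpr
      ((PySem.Chars.isIn_iff_infix sub s).mpr hinf)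
    exact h j hj

-- find points at the first occurrence: the converse direction
theorem pv_find_eq_coe (s sub : List Char) (j : Nat)
    (h1 : sub <+: s.drop j) (h2 : ∀ p < j, ¬ sub <+: s.drop p) :
    PySem.Chars.find s sub = (j : Int) := by
  have hne : PySem.Chars.find s sub ≠ -1 := by
    rw [Ne, pv_find_neg_iff]
    exact fun h => h j h1
  have h0 : 0 ≤ PySem.Chars.find s sub := by
    have := PySem.Chars.neg_one_le_find s sub; omega
  obtain ⟨hp, hmin⟩ := PySem.Chars.find_spec h0
  rcases Nat.lt_trichotomy (PySem.Chars.find s sub).toNat j with h | h | h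
  · exact absurd hp (h2 _ h)
  · omega
  · exact absurd h1 (hmin j h)

-- a prefix occurrence survives truncation to the right, given room
theorem pv_prefix_take (x l : List α) (k p : Nat)
    (h : x <+: l.drop p) (hk : p + x.length ≤ k) : x <+: (l.take k).drop p := by
  rw [List.drop_take]
  rw [List.prefix_iff_eq_take] at h ⊢
  rw [List.take_take, min_eq_left (by omega)]
  exact h

-- and conversely any occurrence in a truncation is one in the list
theorem pv_prefix_of_take (x l : List α) (k p : Nat)
    (h : x <+: (l.take k).drop p) : x <+: l.drop p := by
  rw [List.drop_take] at h
  exact h.trans (List.take_prefix _ _)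

-- '<blockquote>' cannot start strictly inside an occurrence of '</blockquote>'
theorem pv_no_open_inside_close (s : List Char) (j q : Nat)
    (hc : pvClose <+: s.drop j) (h1 : j < q) (hq : q < j + 13) :
    ¬ pvOpen <+: s.drop q := by
  intro h
  obtain ⟨t, ht⟩ := hc
  have hd1 : 1 ≤ q - j := by omega
  have hd2 : q - j ≤ 12 := by omega
  have h' : pvOpen <+: pvClose.drop (q - j) ++ t := by
    have : s.drop q = (s.drop j).drop (q - j) := by
      rw [List.drop_drop]; congr 1; omega
    rw [this, ← ht, List.drop_append_of_le_length (by simp [pvClose]; omega)] at h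
    exact h
  obtain ⟨u, hu⟩ := h'
  have hh := congrArg List.head? hu
  rw [List.head?_append, List.head?_append] at hh
  set d := q - j with hdef
  interval_cases d <;> simp [pvOpen, pvClose] at hh

-- ===== splitOn recurrence =====
-- the three shapes of splitOn.go, as rewrite rules
theorem pv_go_zero (sep cur : List Char) (l : List Char) (acc : List (List Char)) :
    PySem.Chars.splitOn.go sep 0 l cur acc = ((cur.reverse ++ l) :: acc).reverse := by
  rw [PySem.Chars.splitOn.go]

theorem pv_go_nil (sep cur : List Char) (fuel : Nat) (acc : List (List Char)) :
    PySem.Chars.splitOn.go sep (fuel + 1) [] cur acc = (cur.reverse :: acc).reverse := by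
  rw [PySem.Chars.splitOn.go]
  omega

theorem pv_go_cons (sep cur : List Char) (fuel : Nat) (c : Char) (rest : List Char)
    (acc : List (List Char)) :
    PySem.Chars.splitOn.go sep (fuel + 1) (c :: rest) cur acc =
      if sep.isPrefixOf (c :: rest) then
        PySem.Chars.splitOn.go sep fuel (List.drop sep.length (c :: rest)) [] (cur.reverse :: acc)
      else PySem.Chars.splitOn.go sep fuel rest (c :: cur) acc := by
  rw [PySem.Chars.splitOn.go]

theorem pv_go_acc (sep : List Char) (fuel : Nat) (l cur : List Char) (acc : List (List Char)) :
    PySem.Chars.splitOn.go sep fuel l cur acc = acc.reverse ++ PySem.Chars.splitOn.go sep fuel l cur [] := by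
  induction fuel generalizing l cur acc with
  | zero => rw [pv_go_zero, pv_go_zero]; simp
  | succ n ih =>
    cases l with
    | nil => rw [pv_go_nil, pv_go_nil]; simp
    | cons c rest =>
      rw [pv_go_cons, pv_go_cons]
      split
      · rw [ih _ _ (cur.reverse :: acc), ih _ _ [cur.reverse]]; simp
      · rw [ih _ _ acc]

theorem pv_go_fuel (sep : List Char) (hsep : sep ≠ []) (fuel₁ fuel₂ : Nat) (l cur : List Char)
    (acc : List (List Char)) (h1 : l.length ≤ fuel₁) (h2 : l.length ≤ fuel₂) :
    PySem.Chars.splitOn.go sep fuel₁ l cur acc = PySem.Chars.splitOn.go sep fuel₂ l cur acc := by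
  have hsl : 1 ≤ sep.length := by
    cases sep with
    | nil => exact absurd rfl hsep
    | cons a b => simp
  induction fuel₁ generalizing fuel₂ l cur acc with
  | zero =>
    have : l = [] := by cases l with
      | nil => rfl
      | cons c rest => simp at h1
    subst this
    cases fuel₂ with
    | zero => rfl
    | succ m => rw [pv_go_zero, pv_go_nil]; simp
  | succ n ih =>
    cases l with
    | nil =>
      cases fuel₂ with
      | zero => rw [pv_go_zero, pv_go_nil]; simp
      | succ m => rw [pv_go_nil, pv_go_nil]
    | cons c rest =>
      cases fuel₂ with
      | zero => simp at h2
      | succ m =>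
        rw [pv_go_cons, pv_go_cons]
        split
        · apply ih <;> simp at h1 h2 ⊢ <;> omega
        · apply ih <;> simp at h1 h2 ⊢ <;> omega

theorem pv_go_none (sep : List Char) (fuel : Nat) (l cur : List Char) (acc : List (List Char))
    (h : ∀ p, ¬ sep <+: l.drop p) (hf : l.length ≤ fuel) :
    PySem.Chars.splitOn.go sep fuel l cur acc = acc.reverse ++ [cur.reverse ++ l] := by
  induction fuel generalizing l cur acc with
  | zero => rw [pv_go_zero]; simp
  | succ n ih =>
    cases l with
    | nil => rw [pv_go_nil]; simp
    | cons c rest =>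
      rw [pv_go_cons, if_neg]
      · rw [ih rest (c :: cur) acc (fun p => by simpa using h (p + 1)) (by simp at hf; omega)]
        simp
      · intro hpre
        exact h 0 (by simpa using List.isPrefixOf_iff_prefix.mp hpre)

theorem pv_go_pos (sep : List Char) (hsep : sep ≠ []) (fuel : Nat) (l cur : List Char)
    (acc : List (List Char)) (j : Nat)
    (hj : sep <+: l.drop j) (hmin : ∀ p < j, ¬ sep <+: l.drop p) (hf : l.length ≤ fuel) :
    PySem.Chars.splitOn.go sep fuel l cur acc =
      acc.reverse ++ [cur.reverse ++ l.take j] ++ PySem.Chars.splitOn (l.drop (j + sep.length)) sep := by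
  have hsl : 1 ≤ sep.length := by
    cases sep with
    | nil => exact absurd rfl hsep
    | cons a b => simp
  induction j generalizing l cur fuel acc with
  | zero =>
    simp only [List.drop_zero] at hj
    cases l with
    | nil =>
      exact absurd (List.prefix_nil.mp hj) hsep
    | cons c rest =>
      cases fuel with
      | zero => simp at hf
      | succ m =>
        rw [pv_go_cons, if_pos (List.isPrefixOf_iff_prefix.mpr hj)]
        rw [pv_go_acc]
        rw [pv_go_fuel sep hsep m (((c :: rest).drop sep.length).length + 1)
              _ _ _ (by simp at hf ⊢; omega) (by omega)]
        show _ = acc.reverse ++ [cur.reverse ++ (c :: rest).take 0] ++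
          PySem.Chars.splitOn ((c :: rest).drop (0 + sep.length)) sep
        simp [PySem.Chars.splitOn]
  | succ q ih =>
    cases l with
    | nil =>
      rw [List.drop_nil] at hj
      exact absurd (List.prefix_nil.mp hj) hsep
    | cons c rest =>
      cases fuel with
      | zero => simp at hf
      | succ m =>
        rw [pv_go_cons, if_neg]
        · rw [ih m rest (c :: cur) acc (by simpa using hj)
              (fun p hp => by simpa using hmin (p + 1) (by omega)) (by simp at hf; omega)]
          simp
          rw [show q + 1 + sep.length = (q + sep.length) + 1 by omega, List.drop_succ_cons]
        · intro hpre
          exact hmin 0 (by omega) (by simpa using List.isPrefixOf_iff_prefix.mp hpre)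

theorem pv_splitOn_neg (s : List Char) (h : PySem.Chars.find s pvClose = -1) :
    PySem.Chars.splitOn s pvClose = [s] := by
  show PySem.Chars.splitOn.go pvClose (s.length + 1) s [] [] = [s]
  rw [pv_go_none pvClose (s.length + 1) s [] [] ((pv_find_neg_iff s pvClose).mp h) (by omega)]
  simp

theorem pv_splitOn_pos (s : List Char) (j : Nat) (h : PySem.Chars.find s pvClose = (j : Int)) :
    PySem.Chars.splitOn s pvClose = s.take j :: PySem.Chars.splitOn (s.drop (j + 13)) pvClose := by
  have h0 : 0 ≤ PySem.Chars.find s pvClose := by omega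
  obtain ⟨hp, hmin⟩ := PySem.Chars.find_spec h0
  rw [h] at hp hmin
  simp only [Int.toNat_natCast] at hp hmin
  show PySem.Chars.splitOn.go pvClose (s.length + 1) s [] [] = _
  rw [pv_go_pos pvClose (by decide) (s.length + 1) s [] [] j hp hmin (by omega)]
  have : pvClose.length = 13 := by decide
  rw [this]
  simp

theorem pv_splitOn_ne_nil (s : List Char) : PySem.Chars.splitOn s pvClose ≠ [] := by
  by_cases h : PySem.Chars.find s pvClose = -1
  · rw [pv_splitOn_neg s h]; simp
  · have h0 : -1 ≤ PySem.Chars.find s pvClose := PySem.Chars.neg_one_le_find s pvClose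
    have : PySem.Chars.find s pvClose = ((PySem.Chars.find s pvClose).toNat : Int) := by omega
    rw [pv_splitOn_pos s (PySem.Chars.find s pvClose).toNat this]
    simp

-- unfold rules for pvWrapGo, one per branch of A's loop body
theorem pv_wrapGo_noopen (s : List Char) (h : PySem.Chars.find s pvOpen = -1) :
    pvWrapGo s = s := by
  rw [pvWrapGo]
  simp [h]

theorem pv_wrapGo_noclose (s : List Char) (h1 : PySem.Chars.find s pvOpen ≠ -1)
    (h2 : PySem.Chars.findFrom s pvClose (PySem.Chars.find s pvOpen) = -1) :
    pvWrapGo s = s := by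
  rw [pvWrapGo]
  simp [h1, h2]

theorem pv_wrapGo_step (s : List Char) (h1 : PySem.Chars.find s pvOpen ≠ -1)
    (h2 : PySem.Chars.findFrom s pvClose (PySem.Chars.find s pvOpen) ≠ -1) :
    pvWrapGo s =
      (if PySem.Chars.isIn pvDefn (PySem.List.slice s (some (PySem.Chars.find s pvOpen))
            (some (PySem.Chars.findFrom s pvClose (PySem.Chars.find s pvOpen) + 13))) ||
          PySem.Chars.isIn pvDefn2 (PySem.List.slice s (some (PySem.Chars.find s pvOpen))
            (some (PySem.Chars.findFrom s pvClose (PySem.Chars.find s pvOpen) + 13))) then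
        PySem.List.slice s none (some (PySem.Chars.find s pvOpen)) ++ pvDivOpen ++
          PySem.List.slice s (some (PySem.Chars.find s pvOpen))
            (some (PySem.Chars.findFrom s pvClose (PySem.Chars.find s pvOpen) + 13)) ++ pvDivClose
      else
        PySem.List.slice s none
          (some (PySem.Chars.findFrom s pvClose (PySem.Chars.find s pvOpen) + 13))) ++
      pvWrapGo (PySem.List.slice s
        (some (PySem.Chars.findFrom s pvClose (PySem.Chars.find s pvOpen) + 13)) none) := by
  conv_lhs => rw [pvWrapGo]
  simp [h1, h2]

-- the chunk B processes is exactly s.take (j+13) when the first close tag is at j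
theorem pv_take_close (s : List Char) (j : Nat) (hp : pvClose <+: s.drop j) :
    s.take (j + 13) = s.take j ++ pvClose := by
  rw [List.take_add]
  congr 1
  have hl : pvClose.length = 13 := by decide
  rw [List.prefix_iff_eq_take] at hp
  rw [← hp.symm, hl]

-- A's redundant '**Definition:' test collapses: it implies the 'Definition:' test
theorem pv_cond (b : List Char) :
    (PySem.Chars.isIn pvDefn b || PySem.Chars.isIn pvDefn2 b) = PySem.Chars.isIn pvDefn b := by
  cases h : PySem.Chars.isIn pvDefn b with
  | true => simp
  | false =>
    have h2 : PySem.Chars.isIn pvDefn2 b = false := by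
      rw [PySem.Chars.isIn_eq_false_iff]
      intro hinf
      have : PySem.Chars.isIn pvDefn b = true :=
        (PySem.Chars.isIn_iff_infix pvDefn b).mpr ((by decide : pvDefn <:+: pvDefn2).trans hinf)
      rw [h] at this
      exact Bool.noConfusion this
    rw [h2]
    rfl

-- peeling one chunk off B when the first close tag sits at index j
theorem pv_wrapB_cons (s : List Char) (j : Nat)
    (hfc : PySem.Chars.find s pvClose = (j : Int)) :
    pvWrapB s = pvChunk (s.take j ++ pvClose) ++ pvWrapB (s.drop (j + 13)) := by
  unfold pvWrapB
  rw [pv_splitOn_pos s j hfc]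
  have hne := pv_splitOn_ne_nil (s.drop (j + 13))
  rw [List.dropLast_cons_of_ne_nil hne]
  simp only [List.map_cons, List.flatten_cons, List.getLastD_cons]
  obtain ⟨x, hx⟩ := List.getLast?_isSome.mpr hne |> Option.isSome_iff_exists.mp
  rw [List.getLastD_eq_getLast?, List.getLastD_eq_getLast?, hx]
  simp

-- how 'find' behaves on truncations and suffixes of s
theorem pv_find_take_neg (s sub : List Char) (k : Nat) (h : PySem.Chars.find s sub = -1) :
    PySem.Chars.find (s.take k) sub = -1 := by
  rw [pv_find_neg_iff] at h ⊢
  exact fun p hp => h p (pv_prefix_of_take _ _ _ _ hp)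

theorem pv_find_take_late (s sub : List Char) (k st : Nat) (hsub : sub ≠ [])
    (hst : PySem.Chars.find s sub = (st : Int)) (hk : k < st + sub.length) :
    PySem.Chars.find (s.take k) sub = -1 := by
  have hs1 : 0 < sub.length := List.length_pos_of_ne_nil hsub
  rw [pv_find_neg_iff]
  intro p hp
  have hlen := hp.length_le
  simp only [List.length_drop, List.length_take] at hlen
  have h0 : 0 ≤ PySem.Chars.find s sub := by rw [hst]; exact Int.natCast_nonneg st
  obtain ⟨_, hmin⟩ := PySem.Chars.find_spec h0
  rw [hst, Int.toNat_natCast] at hmin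
  exact hmin p (by omega) (pv_prefix_of_take _ _ _ _ hp)

theorem pv_find_take_early (s sub : List Char) (k st : Nat)
    (hst : PySem.Chars.find s sub = (st : Int)) (hk : st + sub.length ≤ k) :
    PySem.Chars.find (s.take k) sub = (st : Int) := by
  have h0 : 0 ≤ PySem.Chars.find s sub := by rw [hst]; exact Int.natCast_nonneg st
  obtain ⟨hp, hmin⟩ := PySem.Chars.find_spec h0
  rw [hst, Int.toNat_natCast] at hp hmin
  apply pv_find_eq_coe
  · exact pv_prefix_take _ _ _ _ hp (by omega)
  · exact fun p hps hocc => hmin p hps (pv_prefix_of_take _ _ _ _ hocc)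

theorem pv_find_drop_neg (s sub : List Char) (d : Nat) (h : PySem.Chars.find s sub = -1) :
    PySem.Chars.find (s.drop d) sub = -1 := by
  rw [pv_find_neg_iff] at h ⊢
  intro p hp
  rw [List.drop_drop] at hp
  exact h _ hp

theorem pv_find_drop (s sub : List Char) (d st : Nat)
    (hst : PySem.Chars.find s sub = (st : Int)) (hd : d ≤ st) :
    PySem.Chars.find (s.drop d) sub = ((st - d : Nat) : Int) := by
  have h0 : 0 ≤ PySem.Chars.find s sub := by rw [hst]; exact Int.natCast_nonneg st
  obtain ⟨hp, hmin⟩ := PySem.Chars.find_spec h0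
  rw [hst, Int.toNat_natCast] at hp hmin
  apply pv_find_eq_coe
  · rw [List.drop_drop, show d + (st - d) = st by omega]
    exact hp
  · intro p hps hocc
    rw [List.drop_drop] at hocc
    exact hmin (d + p) (by omega) hocc

-- A's loop body in Nat form: first open at st, first close from st at st+fn
theorem pv_wrapGo_noclose' (s : List Char) (st : Nat)
    (hfo : PySem.Chars.find s pvOpen = (st : Int))
    (hfc : PySem.Chars.find (s.drop st) pvClose = -1) :
    pvWrapGo s = s := by
  have hle : (st : Int) ≤ (s.length : Int) := hfo ▸ PySem.Chars.find_le_length s pvOpen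
  have hk : st ≤ s.length := by exact_mod_cast hle
  apply pv_wrapGo_noclose
  · rw [hfo]; omega
  · rw [hfo, PySem.Chars.findFrom_natCast s pvClose st hk, hfc]
    simp

theorem pv_wrapGo_step' (s : List Char) (st fn : Nat)
    (hfo : PySem.Chars.find s pvOpen = (st : Int))
    (hfc : PySem.Chars.find (s.drop st) pvClose = (fn : Int)) :
    pvWrapGo s =
      (if PySem.Chars.isIn pvDefn ((s.drop st).take (fn + 13)) then
         s.take st ++ pvDivOpen ++ (s.drop st).take (fn + 13) ++ pvDivClose
       else s.take (st + fn + 13)) ++ pvWrapGo (s.drop (st + fn + 13)) := by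
  have hle : (st : Int) ≤ (s.length : Int) := hfo ▸ PySem.Chars.find_le_length s pvOpen
  have hk : st ≤ s.length := by exact_mod_cast hle
  have hff : PySem.Chars.findFrom s pvClose (PySem.Chars.find s pvOpen) = ((st + fn : Nat) : Int) := by
    rw [hfo, PySem.Chars.findFrom_natCast s pvClose st hk, hfc]
    rw [if_neg (by omega : ¬ ((fn : Int)) = -1)]
    push_cast
    ring
  rw [pv_wrapGo_step s (by rw [hfo]; omega) (by rw [hff]; omega)]
  rw [hff, hfo]
  have hcast : ((st + fn : Nat) : Int) + 13 = ((st + fn + 13 : Nat) : Int) := by push_cast; ring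
  rw [hcast]
  simp only [PySem.List.slice_natCast, PySem.List.slice_to_natCast,
    PySem.List.slice_from_natCast, pv_cond, show st + fn + 13 - st = fn + 13 from by omega]

-- A consumes the whole first chunk unchanged when its first open tag lies beyond it
theorem pv_wrapGo_shift (s : List Char) (j st : Nat)
    (hfo : PySem.Chars.find s pvOpen = (st : Int)) (hst : j + 13 ≤ st) :
    pvWrapGo s = s.take (j + 13) ++ pvWrapGo (s.drop (j + 13)) := by
  have hfo' : PySem.Chars.find (s.drop (j + 13)) pvOpen = ((st - (j + 13) : Nat) : Int) :=
    pv_find_drop s pvOpen (j + 13) st hfo (by omega)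
  have hdd : (s.drop (j + 13)).drop (st - (j + 13)) = s.drop st := by
    rw [List.drop_drop, show j + 13 + (st - (j + 13)) = st by omega]
  by_cases hf : PySem.Chars.find (s.drop st) pvClose = -1
  · rw [pv_wrapGo_noclose' s st hfo hf,
        pv_wrapGo_noclose' (s.drop (j + 13)) (st - (j + 13)) hfo' (by rw [hdd]; exact hf)]
    rw [List.take_append_drop]
  · have h0 : -1 ≤ PySem.Chars.find (s.drop st) pvClose := PySem.Chars.neg_one_le_find _ _
    set fn := (PySem.Chars.find (s.drop st) pvClose).toNat with hfn
    have hfc2 : PySem.Chars.find (s.drop st) pvClose = (fn : Int) := by omega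
    rw [pv_wrapGo_step' s st fn hfo hfc2,
        pv_wrapGo_step' (s.drop (j + 13)) (st - (j + 13)) fn hfo' (by rw [hdd]; exact hfc2)]
    rw [hdd]
    rw [List.drop_drop, show j + 13 + (st - (j + 13) + fn + 13) = st + fn + 13 by omega]
    rw [← List.append_assoc]
    congr 1
    have ht1 : s.take st = s.take (j + 13) ++ (s.drop (j + 13)).take (st - (j + 13)) := by
      conv_lhs => rw [show st = (j + 13) + (st - (j + 13)) by omega]
      rw [List.take_add]
    have ht2 : s.take (st + fn + 13) =
        s.take (j + 13) ++ (s.drop (j + 13)).take (st - (j + 13) + fn + 13) := by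
      conv_lhs => rw [show st + fn + 13 = (j + 13) + (st - (j + 13) + fn + 13) by omega]
      rw [List.take_add]
    split
    · rw [ht1]; simp [List.append_assoc]
    · rw [ht2]

-- ===== main equivalence on char lists =====
theorem pv_main (s : List Char) : pvWrapGo s = pvWrapB s := by
  generalize hn : s.length = n
  induction n using Nat.strong_induction_on generalizing s with
  | _ n ih =>
  subst hn
  by_cases hc : PySem.Chars.find s pvClose = -1
  · -- no close tag anywhere: both sides flush s unchanged
    have hB : pvWrapB s = s := by
      unfold pvWrapB
      rw [pv_splitOn_neg s hc]
      simp
    rw [hB]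
    by_cases ho : PySem.Chars.find s pvOpen = -1
    · exact pv_wrapGo_noopen s ho
    · have h0 := PySem.Chars.neg_one_le_find s pvOpen
      have hfo : PySem.Chars.find s pvOpen = (((PySem.Chars.find s pvOpen).toNat : Nat) : Int) := by omega
      exact pv_wrapGo_noclose' s _ hfo (pv_find_drop_neg s pvClose _ hc)
  · -- first close tag at index j
    have h0c := PySem.Chars.neg_one_le_find s pvClose
    obtain ⟨j, hfc⟩ : ∃ j : Nat, PySem.Chars.find s pvClose = (j : Int) :=
      ⟨(PySem.Chars.find s pvClose).toNat, by omega⟩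
    have h0 : 0 ≤ PySem.Chars.find s pvClose := by rw [hfc]; exact Int.natCast_nonneg j
    obtain ⟨hpc, hminc⟩ := PySem.Chars.find_spec h0
    rw [hfc, Int.toNat_natCast] at hpc hminc
    have hjlen : j + 13 ≤ s.length := by
      have h1 := hpc.length_le
      have h2 : pvClose.length = 13 := by decide
      simp only [List.length_drop, h2] at h1
      omega
    have hchunk : s.take (j + 13) = s.take j ++ pvClose := pv_take_close s j hpc
    have hIH : pvWrapGo (s.drop (j + 13)) = pvWrapB (s.drop (j + 13)) := by
      apply ih (s.drop (j + 13)).length _ _ rfl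
      simp only [List.length_drop]
      omega
    rw [pv_wrapB_cons s j hfc, ← hchunk, ← hIH]
    by_cases ho : PySem.Chars.find s pvOpen = -1
    · -- no open tag at all: the chunk is flushed and A returns s unchanged
      have hCh : pvChunk (s.take (j + 13)) = s.take (j + 13) := by
        unfold pvChunk
        rw [pv_find_take_neg s pvOpen (j + 13) ho]
        simp
      rw [pv_wrapGo_noopen s ho, hCh,
          pv_wrapGo_noopen _ (pv_find_drop_neg s pvOpen (j + 13) ho), List.take_append_drop]
    · have h0o := PySem.Chars.neg_one_le_find s pvOpen
      obtain ⟨st, hfo⟩ : ∃ st : Nat, PySem.Chars.find s pvOpen = (st : Int) :=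
        ⟨(PySem.Chars.find s pvOpen).toNat, by omega⟩
      have h0o' : 0 ≤ PySem.Chars.find s pvOpen := by rw [hfo]; exact Int.natCast_nonneg st
      obtain ⟨hpo, hmino⟩ := PySem.Chars.find_spec h0o'
      rw [hfo, Int.toNat_natCast] at hpo hmino
      have hcases : st ≤ j ∨ j + 13 ≤ st := by
        by_contra hcon
        push Not at hcon
        exact pv_no_open_inside_close s j st hpc (by omega) (by omega) hpo
      have h12 : pvOpen.length = 12 := by decide
      rcases hcases with hst | hst
      · -- the first open tag lies inside the first chunk
        have hstlen : st + 12 ≤ s.length := by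
          have := hpo.length_le
          simp only [List.length_drop, h12] at this
          omega
        have hft : PySem.Chars.find (s.take (j + 13)) pvOpen = (st : Int) :=
          pv_find_take_early s pvOpen (j + 13) st hfo (by omega)
        have hfcd : PySem.Chars.find (s.drop st) pvClose = ((j - st : Nat) : Int) :=
          pv_find_drop s pvClose st j hfc hst
        rw [pv_wrapGo_step' s st (j - st) hfo hfcd]
        have hne : ¬ ((st : Int) = -1) := by omega
        simp only [pvChunk, hft, if_neg hne, PySem.List.slice_from_natCast,
          PySem.List.slice_to_natCast]
        have hblk : (s.take (j + 13)).drop st = (s.drop st).take (j - st + 13) := by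
          rw [List.drop_take, show j + 13 - st = j - st + 13 by omega]
        have hpre : (s.take (j + 13)).take st = s.take st := by
          rw [List.take_take, min_eq_left (by omega)]
        have htail : st + (j - st) + 13 = j + 13 := by omega
        rw [hblk, hpre, htail]
      · -- the first open tag lies beyond the first chunk: A consumes it unchanged
        have hCh : pvChunk (s.take (j + 13)) = s.take (j + 13) := by
          unfold pvChunk
          rw [pv_find_take_late s pvOpen (j + 13) st (by decide) hfo (by omega)]
          simp
        rw [pv_wrapGo_shift s j st hfo hst, hCh]

-- ===== VERDICT (by name: the statement is the Claim_ definition above) =====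
theorem wrap_definition_blocks_spec : Claim_equal_wrap_definition_blocks := by
  intro html _
  unfold Spec_wrap_definition_blocks wrap_definition_blocks wrap_definition_blocks_alt
  rw [pv_main]
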